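-- pv_equiv track=rewrite | github.com/aprili1u/Fish-Network | Network/class_network.py | id_edges
-- ===== SOURCE A (Python) =====
-- def id_edges(z):
-- ##return a dictionnary associating to each edge the nodes concerned. used for M2
--     d={}
--     x=0
--     y=0
--     for i in range (0,int(z)):
--         if(x<y):
--             d[i]=(y,x)
--             x+=1
--         else:
--             y+=1
--             x=0
--             d[i]=(y,x)
--             x+=1
--     return(d)
-- ===== SOURCE B (Python) =====
-- import math
--
-- def id_edges(z):
--     # closed form: edge i lies in "row" y (row y holds y entries, cumulative y*(y+1)//2)
--     d = {}
--     for i in range(int(z)):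
--         y = (math.isqrt(8 * i + 1) + 1) // 2
--         d[i] = (y, i - (y - 1) * y // 2)
--     return d
-- ===== Notes on version B (the rewrite author's own statement) =====
-- stated objective: simpler
-- what changed: Replaces the stateful if/else accumulation of running (x,y) counters by a closed-form index-to-pair formula from triangular numbers (y = (isqrt(8i+1)+1)//2, x = i - (y-1)*y//2), computed independently per index.
import Mathlib
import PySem

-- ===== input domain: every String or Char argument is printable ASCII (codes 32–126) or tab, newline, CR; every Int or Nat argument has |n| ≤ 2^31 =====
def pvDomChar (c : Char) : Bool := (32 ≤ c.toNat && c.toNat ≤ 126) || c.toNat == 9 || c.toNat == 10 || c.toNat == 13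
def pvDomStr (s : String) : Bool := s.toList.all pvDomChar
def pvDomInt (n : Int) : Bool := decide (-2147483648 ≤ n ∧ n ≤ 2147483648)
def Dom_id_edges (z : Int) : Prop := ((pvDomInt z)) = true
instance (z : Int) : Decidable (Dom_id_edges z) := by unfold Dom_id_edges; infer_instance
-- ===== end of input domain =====

-- B replaces A's running (x,y) counters by a closed-form triangular-number formula per index (same cost, simpler).

-- ===== PORT A =====
-- one iteration of A's loop body, carrying (d, x, y)
def pvStepA (s : PySem.Dict Int (Int × Int) × Int × Int) (i : Int) :
    PySem.Dict Int (Int × Int) × Int × Int :=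
  let d := s.1
  let x := s.2.1
  let y := s.2.2
  if x < y then
    (d.insert i (y, x), x + 1, y)
  else
    -- y += 1; x = 0; d[i] = (y, x); x += 1
    (d.insert i (y + 1, 0), 0 + 1, y + 1)

def id_edges (z : Int) : List (Int × Int × Int) :=
  (((PySem.List.pyRange 0 z 1).foldl pvStepA (PySem.Dict.empty, 0, 0)).1).items

-- ===== PORT B =====
-- math.isqrt(8*i+1) is exact here as Nat.sqrt on (8*i+1).toNat, since 8*i+1 ≥ 0 for every i in range(int(z))
def pvRowB (i : Int) : Int := PySem.Int.floordiv ((Nat.sqrt (8 * i + 1).toNat : Int) + 1) 2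

def pvStepB (d : PySem.Dict Int (Int × Int)) (i : Int) : PySem.Dict Int (Int × Int) :=
  d.insert i (pvRowB i, i - PySem.Int.floordiv ((pvRowB i - 1) * pvRowB i) 2)

def id_edges_alt (z : Int) : List (Int × Int × Int) :=
  ((PySem.List.pyRange 0 z 1).foldl pvStepB PySem.Dict.empty).items

-- ===== PRECONDITION & SPEC =====
def Spec_id_edges (z : Int) (out : List (Int × Int × Int)) : Prop := out = id_edges_alt z
instance (z : Int) (out : List (Int × Int × Int)) : Decidable (Spec_id_edges z out) := by unfold Spec_id_edges; infer_instance

-- ===== CLAIM (what is proved, stated in full; the proofs are below) =====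
def Claim_equal_id_edges : Prop := ∀ (z : Int), Dom_id_edges z → Spec_id_edges z (id_edges z)

-- ===== LEMMAS AND PROOFS =====

-- triangular number
def pvT (y : Nat) : Nat := y * (y + 1) / 2
-- closed-form row / offset for index i
def pvY (i : Nat) : Nat := (Nat.sqrt (8 * i + 1) + 1) / 2
def pvX (i : Nat) : Nat := i - pvT (pvY i - 1)
def pvF (i : Nat) : Int × Int := ((pvY i : Int), (pvX i : Int))

lemma pvT_mono {a b : Nat} (h : a ≤ b) : pvT a ≤ pvT b := by
  unfold pvT; exact Nat.div_le_div_right (Nat.mul_le_mul h (by omega))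

lemma pvY_char (i : Nat) : 1 ≤ pvY i ∧ pvT (pvY i - 1) ≤ i ∧ i < pvT (pvY i) := by
  have hs1 : Nat.sqrt (8 * i + 1) * Nat.sqrt (8 * i + 1) ≤ 8 * i + 1 := by
    simpa [Nat.pow_two] using Nat.sqrt_le' (8 * i + 1)
  have hs2 : 8 * i + 1 < (Nat.sqrt (8 * i + 1) + 1) * (Nat.sqrt (8 * i + 1) + 1) := by
    simpa [Nat.pow_two] using Nat.lt_succ_sqrt' (8 * i + 1)
  obtain ⟨s, hs⟩ : ∃ s, Nat.sqrt (8 * i + 1) = s := ⟨_, rfl⟩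
  rw [hs] at hs1 hs2
  have hy : pvY i = (s + 1) / 2 := by unfold pvY; rw [hs]
  have hs0 : 1 ≤ s := by nlinarith
  obtain ⟨t, ht⟩ : ∃ t, pvY i = t + 1 := ⟨pvY i - 1, by rw [hy]; omega⟩
  have hlo : 2 * t + 1 ≤ s := by omega
  have hhi : s ≤ 2 * t + 2 := by omega
  have h1 : (2 * t + 1) * (2 * t + 1) ≤ s * s := Nat.mul_le_mul hlo hlo
  have h2 : (s + 1) * (s + 1) ≤ (2 * t + 3) * (2 * t + 3) :=
    Nat.mul_le_mul (by omega) (by omega)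
  obtain ⟨q, hq⟩ := Nat.even_mul_succ_self t
  obtain ⟨r, hr⟩ := Nat.even_mul_succ_self (t + 1)
  have hqi : q ≤ i := by nlinarith
  have hri : i < r := by nlinarith
  refine ⟨by omega, ?_, ?_⟩
  · rw [ht]
    simp only [Nat.add_sub_cancel]
    unfold pvT
    rw [hq]
    omega
  · rw [ht]
    unfold pvT
    rw [show (t + 1) * (t + 1 + 1) = (t + 1) * (t + 2) by ring, hr]
    omega

lemma pvY_unique {i y : Nat} (h1 : 1 ≤ y) (h2 : pvT (y - 1) ≤ i) (h3 : i < pvT y) :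
    pvY i = y := by
  obtain ⟨hy1, hlo, hhi⟩ := pvY_char i
  by_contra hne
  rcases Nat.lt_or_ge (pvY i) y with h | h
  · have : pvT (pvY i) ≤ pvT (y - 1) := pvT_mono (by omega)
    omega
  · have : pvT y ≤ pvT (pvY i - 1) := pvT_mono (by omega)
    omega

lemma pvT_succ (y : Nat) : pvT (y + 1) = pvT y + (y + 1) := by
  unfold pvT
  rw [show (y + 1) * (y + 1 + 1) = y * (y + 1) + 2 * (y + 1) by ring]
  omega

-- the closed form satisfies A's recurrence
lemma pvF_step_lt (m : Nat) (h : pvX m + 1 < pvY m) :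
    pvY (m + 1) = pvY m ∧ pvX (m + 1) = pvX m + 1 := by
  obtain ⟨hy1, hlo, hhi⟩ := pvY_char m
  have hx : pvX m = m - pvT (pvY m - 1) := rfl
  have hT : pvT (pvY m) = pvT (pvY m - 1) + pvY m := by
    have h2 := pvT_succ (pvY m - 1)
    rw [show pvY m - 1 + 1 = pvY m by omega] at h2
    omega
  have hY : pvY (m + 1) = pvY m := pvY_unique hy1 (by omega) (by omega)
  refine ⟨hY, ?_⟩
  unfold pvX
  rw [hY]
  omega

lemma pvF_step_ge (m : Nat) (h : ¬ pvX m + 1 < pvY m) :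
    pvY (m + 1) = pvY m + 1 ∧ pvX (m + 1) = 0 := by
  obtain ⟨hy1, hlo, hhi⟩ := pvY_char m
  have hT : pvT (pvY m) = pvT (pvY m - 1) + pvY m := by
    have h2 := pvT_succ (pvY m - 1)
    rw [show pvY m - 1 + 1 = pvY m by omega] at h2
    omega
  have hx : pvX m = m - pvT (pvY m - 1) := rfl
  have hm1 : m + 1 = pvT (pvY m) := by omega
  have hTs : pvT (pvY m + 1) = pvT (pvY m) + (pvY m + 1) := pvT_succ _
  have hY : pvY (m + 1) = pvY m + 1 :=
    pvY_unique (by omega) (by simpa using hm1.ge) (by omega)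
  refine ⟨hY, ?_⟩
  unfold pvX
  rw [hY]
  simp only [Nat.add_sub_cancel]
  omega

-- B's per-index value is the closed form pvF
lemma pvStepB_val (i : Nat) (d : PySem.Dict Int (Int × Int)) :
    pvStepB d (i : Int) = d.insert (i : Int) (pvF i) := by
  obtain ⟨hy1, hlo, hhi⟩ := pvY_char i
  have h1 : (8 * (i : Int) + 1).toNat = 8 * i + 1 := by omega
  have hrow : pvRowB (i : Int) = (pvY i : Int) := by
    unfold pvRowB pvY
    rw [h1, PySem.Int.floordiv_eq_ediv_of_pos (by norm_num)]
    omega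
  obtain ⟨t, ht⟩ : ∃ t, pvY i = t + 1 := ⟨pvY i - 1, by omega⟩
  have hlo' : pvT t ≤ i := by
    rw [ht] at hlo; simpa using hlo
  unfold pvStepB
  rw [hrow]
  congr 1
  unfold pvF
  congr 1
  rw [ht]
  rw [show ((((t + 1 : Nat)) : Int) - 1) * (((t + 1 : Nat)) : Int) = ((t * (t + 1) : Nat) : Int)
      by push_cast; ring]
  rw [PySem.Int.floordiv_eq_ediv_of_pos (by norm_num)]
  unfold pvX pvT
  rw [ht]
  simp only [Nat.add_sub_cancel]
  unfold pvT at hlo'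
  omega

-- the dict both loops build after n iterations
def pvD (n : Nat) : PySem.Dict Int (Int × Int) :=
  (List.range n).foldl (fun (d : PySem.Dict Int (Int × Int)) (k : Nat) =>
    d.insert (Int.ofNat k) (pvF k)) PySem.Dict.empty

lemma pvD_succ (m : Nat) : pvD (m + 1) = (pvD m).insert ((m : Nat) : Int) (pvF m) := by
  simp [pvD, List.range_succ, Int.ofNat_eq_natCast]

-- A's loop state after n iterations
def pvSt (n : Nat) : Int × Int :=
  match n with
  | 0 => (0, 0)
  | m + 1 => ((pvX m : Int) + 1, (pvY m : Int))

lemma stepA_closed (m : Nat) :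
    pvStepA (pvD m, pvSt m) ((m : Nat) : Int) = (pvD (m + 1), pvSt (m + 1)) := by
  cases m with
  | zero => decide
  | succ k =>
    unfold pvStepA
    simp only [pvSt]
    by_cases h : pvX k + 1 < pvY k
    · have hc : ((pvX k : Int) + 1 < (pvY k : Int)) := by exact_mod_cast h
      obtain ⟨hY, hX⟩ := pvF_step_lt k h
      simp only [hc, if_pos, pvD_succ (k + 1), pvF, hY, hX]
      push_cast
      rfl
    · have hc : ¬ ((pvX k : Int) + 1 < (pvY k : Int)) := by
        intro hcontra; exact h (by exact_mod_cast hcontra)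
      obtain ⟨hY, hX⟩ := pvF_step_ge k h
      simp only [hc, pvD_succ (k + 1), pvF, hY, hX]
      push_cast
      rfl

lemma range_cast_succ (n : Nat) :
    PySem.List.pyRange 0 ((n + 1 : Nat) : Int) 1 =
      PySem.List.pyRange 0 (n : Int) 1 ++ [(n : Int)] := by
  have h := PySem.List.pyRange_one_succ_right (a := 0) (b := (n : Int)) (by positivity)
  simpa using h

lemma A_inv (n : Nat) :
    (PySem.List.pyRange 0 (n : Int) 1).foldl pvStepA (PySem.Dict.empty, 0, 0) =
      (pvD n, pvSt n) := by
  induction n with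
  | zero => simp [PySem.List.pyRange_one_eq_nil (by omega : (0:Int) ≤ 0), pvD, pvSt]
  | succ m ih =>
    rw [range_cast_succ, List.foldl_append, ih]
    simp only [List.foldl_cons, List.foldl_nil]
    exact stepA_closed m

lemma B_inv (n : Nat) :
    (PySem.List.pyRange 0 (n : Int) 1).foldl pvStepB PySem.Dict.empty = pvD n := by
  induction n with
  | zero => simp [PySem.List.pyRange_one_eq_nil (by omega : (0:Int) ≤ 0), pvD]
  | succ m ih =>
    rw [range_cast_succ, List.foldl_append, ih]
    simp only [List.foldl_cons, List.foldl_nil]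
    rw [pvStepB_val]
    exact (pvD_succ m).symm

-- ===== VERDICT (by name: the statement is the Claim_ definition above) =====
theorem id_edges_spec : Claim_equal_id_edges := by
  intro z _
  unfold Spec_id_edges id_edges id_edges_alt
  rcases (by omega : z ≤ 0 ∨ 0 < z) with hz | hz
  · rw [PySem.List.pyRange_one_eq_nil hz]
    rfl
  · have hcast : z = ((z.toNat : Nat) : Int) := by omega
    rw [hcast, A_inv, B_inv]
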